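-- pv_equiv track=rewrite | github.com/cgoecknerwald/foobar | hash_it_out_en.py | guess_0
-- ===== SOURCE A (Python) =====
-- max_m = 129 * 255
--
-- def guess_0(digest):
-- 	n = digest[0]
-- 	a = []
-- 	while n <= max_m:
-- 		if n % 129 == 0:
-- 			a.append(int(n/129))
-- 		n += 256
-- 	return a
-- ===== SOURCE B (Python) =====
-- def guess_0(digest):
--     n0 = digest[0]
--     qmin = -((-n0) // 129)  # ceil(n0 / 129): smallest quotient with 129*q >= n0
--     return [q for q in range(qmin, 256) if (129 * q - n0) % 256 == 0]
-- ===== Notes on version B (the rewrite author's own statement) =====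
-- stated objective: alternative
-- what changed: Instead of scanning the arithmetic sequence n0, n0+256, ... up to 129*255 and testing each term for divisibility by 129, B enumerates the candidate quotients q from ceil(n0/129) to 255 and keeps q when 129*q lies on that sequence ((129*q - n0) % 256 == 0).
-- outside the precondition, e.g. on guess_0([]): A raises IndexError, B raises IndexError
import Mathlib
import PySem

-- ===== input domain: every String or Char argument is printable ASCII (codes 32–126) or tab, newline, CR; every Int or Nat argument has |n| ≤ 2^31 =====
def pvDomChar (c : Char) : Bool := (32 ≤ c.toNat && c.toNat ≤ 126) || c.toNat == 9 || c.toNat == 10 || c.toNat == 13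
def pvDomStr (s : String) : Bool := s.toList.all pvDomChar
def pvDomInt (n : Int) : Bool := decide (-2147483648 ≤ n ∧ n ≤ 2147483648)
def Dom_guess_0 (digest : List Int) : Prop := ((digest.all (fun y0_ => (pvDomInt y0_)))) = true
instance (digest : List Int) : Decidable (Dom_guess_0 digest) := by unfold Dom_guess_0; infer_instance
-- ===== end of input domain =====

-- B replaces A's scan over n0, n0+256, … ≤ 129*255 by a single pass over the 256
-- candidate quotients q, keeping q when 129*q lies on A's arithmetic sequence.

-- ===== PORT A =====
-- while n <= max_m: if n % 129 == 0: a.append(int(n/129)); n += 256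
-- (int(n/129) is exact here since 129 divides n, so it is ported as n / 129)
def guess_0_loop (n : Int) (a : List Int) : List Int :=
  if n ≤ 32895 then
    guess_0_loop (n + 256) (a ++ (if n % 129 == 0 then [n / 129] else []))
  else a
termination_by (32896 - n).toNat
decreasing_by omega

def guess_0 (digest : List Int) : List Int :=
  match PySem.List.pyGet? digest 0 with
  | some n => guess_0_loop n []
  | none => []   -- digest[0] raises IndexError; excluded by Pre_guess_0

-- ===== PORT B =====
def guess_0_alt (digest : List Int) : List Int :=
  match PySem.List.pyGet? digest 0 with
  | some n0 =>
      (PySem.List.pyRange (-(PySem.Int.floordiv (-n0) 129)) 256 1).filter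
        (fun q => (129 * q - n0) % 256 == 0)
  | none => []   -- digest[0] raises IndexError; excluded by Pre_guess_0

-- ===== PRECONDITION & SPEC =====
-- A raises IndexError on the empty list (digest[0]); only that input is excluded.
def Pre_guess_0 (digest : List Int) : Prop := digest ≠ []
instance (digest : List Int) : Decidable (Pre_guess_0 digest) := by unfold Pre_guess_0; infer_instance
def pvWitness_guess_0 : List Int := [0]

def Spec_guess_0 (digest : List Int) (out : List Int) : Prop := out = guess_0_alt digest
instance (digest : List Int) (out : List Int) : Decidable (Spec_guess_0 digest out) := by unfold Spec_guess_0; infer_instance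

-- ===== CLAIM (what is proved, stated in full; the proofs are below) =====
def Claim_equal_guess_0 : Prop := ∀ (digest : List Int), Dom_guess_0 digest → Pre_guess_0 digest → Spec_guess_0 digest (guess_0 digest)

-- ===== LEMMAS AND PROOFS =====

-- membership in A's loop result, as a linear-arithmetic condition
lemma mem_guess_0_loop (x : Int) : ∀ (n : Int) (a : List Int),
    x ∈ guess_0_loop n a ↔ x ∈ a ∨ (n ≤ 129 * x ∧ 129 * x ≤ 32895 ∧ (129 * x - n) % 256 = 0) := by
  intro n a
  induction n, a using guess_0_loop.induct with
  | case1 n a h ih =>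
    simp only [dite_eq_ite] at ih
    rw [guess_0_loop, if_pos h, ih]
    simp only [List.mem_append]
    constructor
    · rintro ((hx | hemit) | h2)
      · exact Or.inl hx
      · refine Or.inr ?_
        split_ifs at hemit with hd
        · simp only [List.mem_singleton] at hemit
          simp only [beq_iff_eq] at hd
          omega
        · simp at hemit
      · exact Or.inr (by omega)
    · rintro (hx | ⟨h1, h2, h3⟩)
      · exact Or.inl (Or.inl hx)
      · by_cases hc : n + 256 ≤ 129 * x
        · exact Or.inr (by omega)
        · -- then 129*x = n, so the if-branch emitted x = n/129
          have hxn : 129 * x = n := by omega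
          refine Or.inl (Or.inr ?_)
          have hd : n % 129 == 0 := by simp only [beq_iff_eq]; omega
          rw [if_pos hd]
          simp only [List.mem_singleton]
          omega
  | case2 n a h =>
    rw [guess_0_loop, if_neg h]
    constructor
    · exact Or.inl
    · rintro (hx | ⟨h1, h2, h3⟩)
      · exact hx
      · omega

-- A's loop result is strictly increasing
lemma pairwise_guess_0_loop : ∀ (n : Int) (a : List Int),
    a.Pairwise (· < ·) → (∀ x ∈ a, 129 * x < n) → (guess_0_loop n a).Pairwise (· < ·) := by
  intro n a
  induction n, a using guess_0_loop.induct with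
  | case1 n a h ih =>
    intro hp hb
    rw [guess_0_loop, if_pos h]
    apply ih
    · rw [List.pairwise_append]
      refine ⟨hp, ?_, ?_⟩
      · split_ifs <;> simp
      · intro x hx y hy
        split_ifs at hy with hd
        · simp only [List.mem_singleton] at hy
          simp only [beq_iff_eq] at hd
          have := hb x hx
          omega
        · simp at hy
    · intro x hx
      rcases List.mem_append.mp hx with hx | hx
      · have := hb x hx; omega
      · split_ifs at hx with hd
        · simp only [List.mem_singleton] at hx
          simp only [beq_iff_eq] at hd
          omega
        · simp at hx
  | case2 n a h =>
    intro hp _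
    rw [guess_0_loop, if_neg h]
    exact hp

-- two strictly increasing lists with the same elements are equal
lemma eq_of_pairwise_lt_of_mem_iff : ∀ (l1 l2 : List Int),
    l1.Pairwise (· < ·) → l2.Pairwise (· < ·) → (∀ x, x ∈ l1 ↔ x ∈ l2) → l1 = l2 := by
  intro l1
  induction l1 with
  | nil =>
    intro l2 _ _ hmem
    cases l2 with
    | nil => rfl
    | cons b t2 => exact absurd ((hmem b).mpr (List.mem_cons_self)) (by simp)
  | cons a t1 ih =>
    intro l2 h1 h2 hmem
    cases l2 with
    | nil => exact absurd ((hmem a).mp (List.mem_cons_self)) (by simp)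
    | cons b t2 =>
      have hab : a = b := by
        rcases List.mem_cons.mp ((hmem a).mp List.mem_cons_self) with h | h
        · exact h
        · rcases List.mem_cons.mp ((hmem b).mpr List.mem_cons_self) with h' | h'
          · exact h'.symm
          · have hba := (List.pairwise_cons.mp h2).1 a h
            have hab := (List.pairwise_cons.mp h1).1 b h'
            exact absurd hab (not_lt.mpr hba.le)
      subst hab
      have htail : ∀ x, x ∈ t1 ↔ x ∈ t2 := by
        intro x
        constructor
        · intro hx
          have hax := (List.pairwise_cons.mp h1).1 x hx
          rcases List.mem_cons.mp ((hmem x).mp (List.mem_cons_of_mem a hx)) with h | h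
          · exact absurd h (by intro h; exact lt_irrefl a (h ▸ hax))
          · exact h
        · intro hx
          have hax := (List.pairwise_cons.mp h2).1 x hx
          rcases List.mem_cons.mp ((hmem x).mpr (List.mem_cons_of_mem a hx)) with h | h
          · exact absurd h (by intro h; exact lt_irrefl a (h ▸ hax))
          · exact h
      exact congrArg (a :: ·) (ih t2 (List.pairwise_cons.mp h1).2 (List.pairwise_cons.mp h2).2 htail)

-- membership in B's filtered quotient range, as the same linear condition
lemma mem_guess_0_alt_list (n0 x : Int) :
    x ∈ (PySem.List.pyRange (-(PySem.Int.floordiv (-n0) 129)) 256 1).filter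
          (fun q => (129 * q - n0) % 256 == 0)
      ↔ (n0 ≤ 129 * x ∧ 129 * x ≤ 32895 ∧ (129 * x - n0) % 256 = 0) := by
  rw [List.mem_filter, PySem.List.mem_pyRange_one,
      PySem.Int.floordiv_eq_ediv_of_pos (a := -n0) (by norm_num)]
  simp only [beq_iff_eq]
  omega

-- ===== VERDICT (by name: the statement is the Claim_ definition above) =====
theorem guess_0_spec : Claim_equal_guess_0 := by
  intro digest _ hpre
  unfold Spec_guess_0
  cases digest with
  | nil => exact absurd rfl hpre
  | cons n rest =>
    show guess_0 (n :: rest) = guess_0_alt (n :: rest)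
    unfold guess_0 guess_0_alt
    rw [PySem.List.pyGet?_zero_cons]
    apply eq_of_pairwise_lt_of_mem_iff
    · exact pairwise_guess_0_loop n [] List.Pairwise.nil (by simp)
    · exact List.Pairwise.filter _ (PySem.List.pairwise_lt_pyRange_one _ _)
    · intro x
      rw [mem_guess_0_loop, mem_guess_0_alt_list]
      simp
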